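-- pv_equiv track=rewrite | github.com/aldrinc/foundry | services/foundry-server/src/foundry_server/orchestration/executor.py | _dedupe_stream_chunk
-- ===== SOURCE A (Python) =====
-- def _dedupe_stream_chunk(existing: str, incoming: str) -> str:
--     next_chunk = incoming or ""
--     if not next_chunk:
--         return ""
--     if not existing:
--         return next_chunk
--     if next_chunk in existing or existing.endswith(next_chunk):
--         return ""
--
--     overlap_limit = min(len(existing), len(next_chunk), 2000)
--     for size in range(overlap_limit, 0, -1):
--         if existing[-size:] == next_chunk[:size]:
--             next_chunk = next_chunk[size:]
--             break
--     if not next_chunk: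
--         return ""
--
--     # Some streaming providers emit cumulative snapshots mid-stream.
--     # Trim repeated tail content if we detect a long overlap with already
--     # emitted text.
--     if len(existing) >= 120 and len(next_chunk) >= 120:
--         max_offset = len(next_chunk) - 80
--         for offset in range(20, max_offset + 1):
--             probe = next_chunk[offset : offset + 80]
--             if probe and probe in existing:
--                 next_chunk = next_chunk[:offset]
--                 break
--
--     return next_chunk
-- ===== SOURCE B (Python) =====
-- def _dedupe_stream_chunk(existing: str, incoming: str) -> str:
--     if not incoming:
--         return ""
--     if not existing:
--         return incoming
--     if incoming in existing:
--         return ""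
--
--     # Largest suffix-of-existing / prefix-of-incoming overlap (capped at 2000),
--     # scanned via find() jumps over candidate positions of incoming's first char.
--     limit = min(len(existing), len(incoming), 2000)
--     tail = existing[len(existing) - limit:]
--     rest = incoming
--     idx = tail.find(incoming[0])
--     while idx != -1:
--         if incoming.startswith(tail[idx:]):
--             rest = incoming[limit - idx:]
--             break
--         idx = tail.find(incoming[0], idx + 1)
--
--     if not rest:
--         return ""
--     if len(existing) >= 120 and len(rest) >= 120:
--         # One precomputed set of existing's 80-grams replaces a substring scan per offset.
--         grams = {existing[i:i + 80] for i in range(len(existing) - 79)}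
--         for offset in range(20, len(rest) - 80 + 1):
--             if rest[offset:offset + 80] in grams:
--                 return rest[:offset]
--     return rest
-- ===== Notes on version B (the rewrite author's own statement) =====
-- stated objective: faster
-- what changed: The descending size-by-size overlap scan is replaced by find()-driven jumps over candidate positions of incoming's first character in existing's tail, and the per-offset 'probe in existing' substring scans are replaced by one precomputed set of existing's 80-grams probed in O(1) per offset.
import Mathlib
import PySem

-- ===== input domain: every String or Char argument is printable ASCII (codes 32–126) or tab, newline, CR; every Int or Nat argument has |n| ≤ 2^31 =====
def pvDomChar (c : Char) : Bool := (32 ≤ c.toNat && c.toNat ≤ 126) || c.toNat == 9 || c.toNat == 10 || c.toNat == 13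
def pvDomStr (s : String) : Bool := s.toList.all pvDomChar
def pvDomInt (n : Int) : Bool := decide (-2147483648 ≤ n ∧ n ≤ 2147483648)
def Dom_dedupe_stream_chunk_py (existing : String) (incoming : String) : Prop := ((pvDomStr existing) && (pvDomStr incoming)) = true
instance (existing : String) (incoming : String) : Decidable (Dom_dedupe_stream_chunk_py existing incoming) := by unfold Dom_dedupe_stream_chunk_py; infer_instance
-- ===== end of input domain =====

-- B replaces A's descending full-comparison overlap scan by find()-driven jumps over
-- first-char candidates, and A's per-offset substring scan by one precomputed set of
-- existing's 80-grams (objective: faster, constant-factor mechanism).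

-- ===== PORT A =====

-- for size in range(limit, 0, -1): if existing[-size:] == next_chunk[:size]: next_chunk = next_chunk[size:]; break
def dedupeOverlapA (e n : List Char) : Nat → List Char
  | 0 => n
  | Nat.succ k =>
      if PySem.List.slice e (some (-((k + 1 : Nat) : Int))) none
          = PySem.List.slice n none (some ((k + 1 : Nat) : Int)) then
        PySem.List.slice n (some ((k + 1 : Nat) : Int)) none
      else dedupeOverlapA e n k

-- for offset in range(20, max_offset+1): probe = next_chunk[offset:offset+80]; if probe and probe in existing: next_chunk = next_chunk[:offset]; break
def dedupeTailA (e n : List Char) : Nat → Nat → List Char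
  | _, 0 => n
  | offset, Nat.succ cnt =>
      let probe := PySem.List.slice n (some (offset : Int)) (some ((offset : Int) + 80))
      if (!probe.isEmpty && PySem.Chars.isIn probe e) then
        PySem.List.slice n none (some (offset : Int))
      else dedupeTailA e n (offset + 1) cnt

def dedupe_stream_chunk_py (existing : String) (incoming : String) : String :=
  let e := existing.toList
  let n := incoming.toList
  if n.isEmpty then ""
  else if e.isEmpty then incoming
  else if PySem.Chars.isIn n e || PySem.Chars.endswith e n then ""
  else
    let limit := min (min e.length n.length) 2000
    let n2 := dedupeOverlapA e n limit
    if n2.isEmpty then ""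
    else if 120 ≤ e.length ∧ 120 ≤ n2.length then
      String.ofList (dedupeTailA e n2 20 (n2.length - 80 + 1 - 20))
    else String.ofList n2

-- ===== PORT B =====

-- grams = {existing[i:i+80] for i in range(len(existing) - 79)}
def grams80 (e : List Char) : PySem.Set (List Char) :=
  PySem.Set.ofList ((PySem.List.pyRange 0 ((e.length : Int) - 79) 1).map
    (fun i => PySem.List.slice e (some i) (some (i + 80))))

-- while idx != -1: if incoming.startswith(tail[idx:]): rest = incoming[limit-idx:]; break
--                  idx = tail.find(incoming[0], idx + 1)
-- (fuel only makes the recursion structural; the loop visits strictly increasing indices)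
def dedupeOverlapB (tl n : List Char) (c : Char) : Int → Nat → List Char
  | _, 0 => n
  | idx, Nat.succ fuel =>
      if idx = -1 then n
      else if PySem.Chars.startswith n (PySem.List.slice tl (some idx) none) then
        PySem.List.slice n (some ((tl.length : Int) - idx)) none
      else dedupeOverlapB tl n c (PySem.Chars.findFrom tl [c] (idx + 1) none) fuel

-- for offset in range(20, len(rest) - 80 + 1): if rest[offset:offset+80] in grams: return rest[:offset]
def dedupeTailB (g : PySem.Set (List Char)) (n : List Char) : Nat → Nat → List Char
  | _, 0 => n
  | offset, Nat.succ cnt =>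
      if PySem.Set.contains g (PySem.List.slice n (some (offset : Int)) (some ((offset : Int) + 80))) then
        PySem.List.slice n none (some (offset : Int))
      else dedupeTailB g n (offset + 1) cnt

def dedupe_stream_chunk_py_alt (existing : String) (incoming : String) : String :=
  let e := existing.toList
  let n := incoming.toList
  if n.isEmpty then ""
  else if e.isEmpty then incoming
  else if PySem.Chars.isIn n e then ""
  else
    let limit := min (min e.length n.length) 2000
    let tl := PySem.List.slice e (some ((e.length : Int) - (limit : Int))) none
    let c := n.headI
    let rest := dedupeOverlapB tl n c (PySem.Chars.find tl [c]) (tl.length + 1)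
    if rest.isEmpty then ""
    else if 120 ≤ e.length ∧ 120 ≤ rest.length then
      String.ofList (dedupeTailB (grams80 e) rest 20 (rest.length - 80 + 1 - 20))
    else String.ofList rest

-- ===== PRECONDITION & SPEC =====
def Spec_dedupe_stream_chunk_py (existing : String) (incoming : String) (out : String) : Prop := out = dedupe_stream_chunk_py_alt existing incoming
instance (existing : String) (incoming : String) (out : String) : Decidable (Spec_dedupe_stream_chunk_py existing incoming out) := by unfold Spec_dedupe_stream_chunk_py; infer_instance

-- ===== CLAIM (what is proved, stated in full; the proofs are below) =====
def Claim_equal_dedupe_stream_chunk_py : Prop := ∀ (existing : String) (incoming : String), Dom_dedupe_stream_chunk_py existing incoming → Spec_dedupe_stream_chunk_py existing incoming (dedupe_stream_chunk_py existing incoming)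

-- ===== LEMMAS AND PROOFS =====

-- reference scanner: try start positions j, j+1, … of tl ascending, return n minus the
-- matched suffix length at the first j where tl.drop j is a prefix of n
def scanIdx (tl n : List Char) (j : Nat) : List Char :=
  if h : j < tl.length then
    (if tl.drop j <+: n then n.drop (tl.length - j) else scanIdx tl n (j + 1))
  else n
termination_by tl.length - j
decreasing_by omega

theorem scanIdx_ge (tl n : List Char) (j : Nat) (h : ¬ j < tl.length) :
    scanIdx tl n j = n := by rw [scanIdx]; simp [h]

theorem overlapA_eq_scan (e n : List Char) (limit : Nat)
    (he : limit ≤ e.length) :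
    ∀ k, k ≤ limit →
      dedupeOverlapA e n k = scanIdx (e.drop (e.length - limit)) n (limit - k) := by
  intro k
  induction k with
  | zero =>
    intro _
    rw [dedupeOverlapA, scanIdx_ge]
    simp only [List.length_drop]
    omega
  | succ k ih =>
    intro hk
    have hlen : (e.drop (e.length - limit)).length = limit := by
      simp only [List.length_drop]; omega
    have hdrop : (e.drop (e.length - limit)).drop (limit - (k + 1))
        = e.drop (e.length - (k + 1)) := by
      rw [List.drop_drop]; congr 1; omega
    have hdlen : (e.drop (e.length - (k + 1))).length = k + 1 := by
      simp only [List.length_drop]; omega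
    rw [dedupeOverlapA, scanIdx]
    rw [dif_pos (by omega : limit - (k + 1) < (e.drop (e.length - limit)).length)]
    rw [hdrop]
    rw [PySem.List.slice_from_neg_natCast e (k + 1) (by omega),
        PySem.List.slice_to_natCast, PySem.List.slice_from_natCast]
    by_cases hc : e.drop (e.length - (k + 1)) = n.take (k + 1)
    · rw [if_pos hc, if_pos (by rw [List.prefix_iff_eq_take, hdlen]; exact hc), hlen]
      congr 1; omega
    · rw [if_neg hc, if_neg (by rw [List.prefix_iff_eq_take, hdlen]; exact hc)]
      rw [ih (by omega)]
      congr 1; omega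

theorem scan_of_no_hit (tl n : List Char) (j : Nat)
    (h : ∀ i, j ≤ i → i < tl.length → ¬ tl.drop i <+: n) :
    scanIdx tl n j = n := by
  rw [scanIdx]
  split
  · rename_i hj
    rw [if_neg (h j le_rfl hj)]
    exact scan_of_no_hit tl n (j + 1) (fun i hi hl => h i (by omega) hl)
  · rfl
termination_by tl.length - j

theorem scan_skip (tl n : List Char) (j p : Nat) (hjp : j ≤ p) (hp : p ≤ tl.length)
    (h : ∀ i, j ≤ i → i < p → ¬ tl.drop i <+: n) :
    scanIdx tl n j = scanIdx tl n p := by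
  rcases Nat.eq_or_lt_of_le hjp with rfl | hlt
  · rfl
  · rw [scanIdx, dif_pos (by omega : j < tl.length), if_neg (h j le_rfl hlt)]
    exact scan_skip tl n (j + 1) p hlt hp (fun i hi h2 => h i (by omega) h2)
termination_by p - j

-- a nonempty prefix of c :: t starts with c
theorem prefix_cons_head (c : Char) (t l : List Char) (h : l <+: (c :: t)) (h2 : l ≠ []) :
    [c] <+: l := by
  match l, h2 with
  | x :: xs, _ =>
    obtain ⟨s, hs⟩ := h
    simp only [List.cons_append, List.cons.injEq] at hs
    exact ⟨xs, by simp [hs.1]⟩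

theorem overlapB_eq_scan (tl : List Char) (c : Char) (t : List Char) :
    ∀ fuel j, j ≤ tl.length → tl.length + 1 - j ≤ fuel →
      dedupeOverlapB tl (c :: t) c (PySem.Chars.findFrom tl [c] (j : Int) none) fuel
        = scanIdx tl (c :: t) j := by
  intro fuel
  induction fuel with
  | zero => intro j hj hf; omega
  | succ fuel ih =>
    intro j hj hf
    by_cases hr : PySem.Chars.findFrom tl [c] (j : Int) none = -1
    · rw [hr, dedupeOverlapB, if_pos rfl]
      refine (scan_of_no_hit tl (c :: t) j ?_).symm
      intro i hji hil hpre
      have hcpre : [c] <+: tl.drop i :=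
        prefix_cons_head c t _ hpre (by simp only [ne_eq, List.drop_eq_nil_iff]; omega)
      have hinf : [c] <:+: tl.drop j := by
        have : tl.drop i = (tl.drop j).drop (i - j) := by rw [List.drop_drop]; congr 1; omega
        rw [this] at hcpre
        exact hcpre.isInfix.trans (List.drop_suffix _ _).isInfix
      exact ((PySem.Chars.findFrom_natCast_eq_neg_one_iff tl [c] j hj).mp hr) hinf
    · obtain ⟨h1, h2, h3⟩ := PySem.Chars.findFrom_natCast_spec tl [c] j hj hr
      set r := PySem.Chars.findFrom tl [c] (j : Int) none with hrdef
      have hr0 : 0 ≤ r := le_trans (by exact_mod_cast Int.natCast_nonneg j) h1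
      have hp : r.toNat < tl.length := by
        have := h2.length_le
        simp only [List.length_cons, List.length_nil, List.length_drop] at this
        omega
      have hjp : j ≤ r.toNat := by omega
      have hskip : scanIdx tl (c :: t) j = scanIdx tl (c :: t) r.toNat := by
        refine scan_skip tl (c :: t) j r.toNat hjp (by omega) ?_
        intro i hji hip hpre
        exact h3 i hji hip
          (prefix_cons_head c t _ hpre (by simp only [ne_eq, List.drop_eq_nil_iff]; omega))
      rw [hskip, dedupeOverlapB, if_neg hr,
          PySem.List.slice_from tl hr0, scanIdx, dif_pos hp]
      by_cases hc : tl.drop r.toNat <+: (c :: t)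
      · rw [if_pos ((PySem.Chars.startswith_iff _ _).mpr hc), if_pos hc,
            PySem.List.slice_from _ (by omega : (0:Int) ≤ (tl.length : Int) - r)]
        congr 1; omega
      · rw [if_neg (by simpa using (mt (PySem.Chars.startswith_iff _ _).mp hc)), if_neg hc]
        have hcast : r + 1 = ((r.toNat + 1 : Nat) : Int) := by push_cast; omega
        rw [hcast, ih (r.toNat + 1) (by omega) (by omega)]

theorem mem_grams80 (e probe : List Char) (hp : probe.length = 80) :
    PySem.Set.contains (grams80 e) probe = (!probe.isEmpty && PySem.Chars.isIn probe e) := by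
  have hne : probe.isEmpty = false := by
    cases probe
    · simp at hp
    · rfl
  rw [hne]
  simp only [Bool.not_false, Bool.true_and]
  rw [Bool.eq_iff_iff, PySem.Set.contains_iff, PySem.Chars.isIn_iff_infix]
  unfold grams80
  rw [PySem.Set.mem_ofList, List.mem_map]
  constructor
  · rintro ⟨i, hi, rfl⟩
    rw [PySem.List.mem_pyRange_one] at hi
    obtain ⟨hi0, hilt⟩ := hi
    rw [PySem.List.slice_toNat e hi0 (by omega)]
    have : (i + 80).toNat - i.toNat = 80 := by omega
    rw [this]
    exact (List.take_prefix _ _).isInfix.trans (List.drop_suffix _ _).isInfix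
  · intro hinf
    obtain ⟨jj, hpre⟩ := (PySem.Chars.exists_prefix_drop_iff_isIn probe e).mpr
      ((PySem.Chars.isIn_iff_infix probe e).mpr hinf)
    have hlen : jj + 80 ≤ e.length := by
      have := hpre.length_le
      simp only [List.length_drop] at this
      omega
    refine ⟨(jj : Int), ?_, ?_⟩
    · rw [PySem.List.mem_pyRange_one]
      constructor
      · exact_mod_cast Int.natCast_nonneg jj
      · omega
    · rw [PySem.List.slice_toNat e (by exact_mod_cast Int.natCast_nonneg jj) (by omega)]
      have h80 : ((jj : Int) + 80).toNat - ((jj : Int)).toNat = 80 := by omega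
      rw [h80]
      rw [List.prefix_iff_eq_take, hp] at hpre
      simp only [Int.toNat_natCast]
      exact hpre.symm

theorem tailA_eq_tailB (e n : List Char) :
    ∀ cnt offset, offset + cnt + 79 = n.length →
      dedupeTailA e n offset cnt = dedupeTailB (grams80 e) n offset cnt := by
  intro cnt
  induction cnt with
  | zero => intro offset _; rw [dedupeTailA, dedupeTailB]
  | succ cnt ih =>
    intro offset hoff
    rw [dedupeTailA, dedupeTailB]
    have hplen : (PySem.List.slice n (some (offset : Int)) (some ((offset : Int) + 80))).length = 80 := by
      rw [PySem.List.slice_toNat n (by omega) (by omega)]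
      simp only [List.length_take, List.length_drop]
      omega
    rw [mem_grams80 e _ hplen]
    by_cases hc : (!(PySem.List.slice n (some (offset : Int)) (some ((offset : Int) + 80))).isEmpty
        && PySem.Chars.isIn (PySem.List.slice n (some (offset : Int)) (some ((offset : Int) + 80))) e) = true
    · rw [if_pos hc, if_pos hc]
    · rw [if_neg hc, if_neg hc]
      exact ih (offset + 1) (by omega)

-- ===== VERDICT (by name: the statement is the Claim_ definition above) =====
theorem main_eq (existing incoming : String) :
    dedupe_stream_chunk_py existing incoming = dedupe_stream_chunk_py_alt existing incoming := by
  simp only [dedupe_stream_chunk_py, dedupe_stream_chunk_py_alt]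
  by_cases h1 : incoming.toList.isEmpty = true
  · rw [if_pos h1, if_pos h1]
  · rw [if_neg h1, if_neg h1]
    by_cases h2 : existing.toList.isEmpty = true
    · rw [if_pos h2, if_pos h2]
    · rw [if_neg h2, if_neg h2]
      by_cases h3 : PySem.Chars.isIn incoming.toList existing.toList = true
      · rw [if_pos (by rw [h3]; simp), if_pos h3]
      · have h3f : PySem.Chars.isIn incoming.toList existing.toList = false :=
          Bool.eq_false_iff.mpr h3
        have hend : PySem.Chars.endswith existing.toList incoming.toList = false := by
          by_contra hq
          have hsuf := (PySem.Chars.endswith_iff _ _).mp (Bool.not_eq_false _ |>.mp hq)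
          exact h3 ((PySem.Chars.isIn_iff_infix _ _).mpr hsuf.isInfix)
        rw [if_neg (by simp [h3f, hend]), if_neg h3]
        obtain ⟨c, t, hct⟩ : ∃ c t, incoming.toList = c :: t := by
          cases hh : incoming.toList
          · rw [hh] at h1; simp at h1
          · exact ⟨_, _, rfl⟩
        rw [hct]
        set e := existing.toList with he
        set lim := min (min e.length (c :: t).length) 2000 with hlim
        have hlimle : lim ≤ e.length :=
          le_trans (min_le_left _ _) (min_le_left _ _)
        have htl : PySem.List.slice e (some ((e.length : Int) - (lim : Int))) none
            = e.drop (e.length - lim) := by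
          rw [PySem.List.slice_from e (by omega : (0:Int) ≤ (e.length : Int) - (lim : Int))]
          congr 1; omega
        have htllen : (e.drop (e.length - lim)).length = lim := by
          simp only [List.length_drop]; omega
        rw [htl]
        simp only [List.headI]
        have hA : dedupeOverlapA e (c :: t) lim
            = scanIdx (e.drop (e.length - lim)) (c :: t) 0 := by
          have h := overlapA_eq_scan e (c :: t) lim hlimle lim le_rfl
          simpa using h
        have hB : dedupeOverlapB (e.drop (e.length - lim)) (c :: t) c
              (PySem.Chars.find (e.drop (e.length - lim)) [c])
              ((e.drop (e.length - lim)).length + 1)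
            = scanIdx (e.drop (e.length - lim)) (c :: t) 0 := by
          have h := overlapB_eq_scan (e.drop (e.length - lim)) c t
            ((e.drop (e.length - lim)).length + 1) 0 (by omega) (by omega)
          simpa using h
        rw [hA, hB]
        set rest := scanIdx (e.drop (e.length - lim)) (c :: t) 0 with hrest
        by_cases h4 : rest.isEmpty = true
        · rw [if_pos h4, if_pos h4]
        · rw [if_neg h4, if_neg h4]
          by_cases h5 : 120 ≤ e.length ∧ 120 ≤ rest.length
          · rw [if_pos h5, if_pos h5]
            rw [tailA_eq_tailB e rest (rest.length - 80 + 1 - 20) 20 (by omega)]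
          · rw [if_neg h5, if_neg h5]

theorem dedupe_stream_chunk_py_spec : Claim_equal_dedupe_stream_chunk_py := by
  intro existing incoming _
  exact main_eq existing incoming
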